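-- pv_equiv track=rewrite | github.com/IdrisTheDragon/Advent2023 | day-13/day13.py | match_rows
-- ===== SOURCE A (Python) =====
-- def match_rows(r1,r2):
--     # returns whether rows match and if a change was made to get them to match.
--     if part1:
--         return (r1 == r2,False)
--     if r1 == r2:
--         # No change made
--         return (True,False)
--     # Need to make a signle change to match
--     for i in range(0,len(r1)):
--         tr1 = list(r1)
--         tr1[i] = '.' if tr1[i] == '#' else '#'
--         tr1 = ''.join(tr1)
--         if tr1 == r2:
--             return (True,True)
--     for i in range(0,len(r2)):
--         tr2 = list(r2)
--         tr2[i] = '.' if tr2[i] == '#' else '#'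
--         tr2 = ''.join(tr2)
--         if r1 == tr2:
--             return (True,True)
--     return (False,False)
--
-- part1 = False
-- ===== SOURCE B (Python) =====
-- part1 = False
--
-- def _flip(c):
--     return '.' if c == '#' else '#'
--
-- def match_rows(r1, r2):
--     if part1:
--         return (r1 == r2, False)
--     if r1 == r2:
--         return (True, False)
--     if len(r1) != len(r2):
--         return (False, False)
--     diffs = [i for i in range(len(r1)) if r1[i] != r2[i]]
--     if len(diffs) == 1:
--         i = diffs[0]
--         if _flip(r1[i]) == r2[i] or _flip(r2[i]) == r1[i]:
--             return (True, True)
--     return (False, False)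
-- ===== Notes on version B (the rewrite author's own statement) =====
-- stated objective: faster
-- what changed: Instead of rebuilding and comparing a flipped copy of the whole string for every index (two quadratic rescan loops), B computes the list of differing indices in one pass and decides by a constant-time flip check on the single diff position.
import Mathlib
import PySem

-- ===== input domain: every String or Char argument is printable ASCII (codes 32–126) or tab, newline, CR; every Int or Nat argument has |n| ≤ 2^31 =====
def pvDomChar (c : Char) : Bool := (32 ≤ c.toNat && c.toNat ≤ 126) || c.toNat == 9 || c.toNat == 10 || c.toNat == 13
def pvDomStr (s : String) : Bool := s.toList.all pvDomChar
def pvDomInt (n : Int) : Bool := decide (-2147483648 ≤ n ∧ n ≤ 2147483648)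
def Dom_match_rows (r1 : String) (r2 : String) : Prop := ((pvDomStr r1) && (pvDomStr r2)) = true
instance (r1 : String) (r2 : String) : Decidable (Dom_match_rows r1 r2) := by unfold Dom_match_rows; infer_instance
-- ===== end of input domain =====

-- B replaces A's two quadratic flip-and-rebuild rescan loops by one diff-index pass plus a constant check.

-- ===== PORT A =====
-- module constant `part1 = False`
def part1 : Bool := false

-- the Python `'.' if c == '#' else '#'`
def pvFlip (c : Char) : Char := if c = '#' then '.' else '#'

-- `for i in range(0,len(r1)): tr1=list(r1); tr1[i]=flip; tr1=''.join(tr1); if tr1 == r2: return (True,True)`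
-- early-return-True loop = any over the range; tr1[i] read is in range (i < len a), so getD is exact
def pvTryFlips (a b : List Char) : Bool :=
  (List.range a.length).any (fun i => a.set i (pvFlip (a.getD i ' ')) = b)

def match_rows (r1 : String) (r2 : String) : Bool × Bool :=
  if part1 then (r1 == r2, false)
  else if r1 = r2 then (true, false)
  else if pvTryFlips r1.toList r2.toList then (true, true)
  else if pvTryFlips r2.toList r1.toList then (true, true)
  else (false, false)

-- ===== PORT B =====
-- `diffs = [i for i in range(len(r1)) if r1[i] != r2[i]]` (indices in range, so getD is exact)
def pvDiffs (a b : List Char) : List Nat :=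
  (List.range a.length).filter (fun i => a.getD i ' ' ≠ b.getD i ' ')

def match_rows_alt (r1 : String) (r2 : String) : Bool × Bool :=
  if part1 then (r1 == r2, false)
  else if r1 = r2 then (true, false)
  else if r1.toList.length ≠ r2.toList.length then (false, false)
  else
    match pvDiffs r1.toList r2.toList with
    | [i] =>
      if pvFlip (r1.toList.getD i ' ') = r2.toList.getD i ' ' ∨
         pvFlip (r2.toList.getD i ' ') = r1.toList.getD i ' ' then (true, true)
      else (false, false)
    | _ => (false, false)

-- ===== PRECONDITION & SPEC =====
def Spec_match_rows (r1 : String) (r2 : String) (out : Bool × Bool) : Prop := out = match_rows_alt r1 r2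
instance (r1 : String) (r2 : String) (out : Bool × Bool) : Decidable (Spec_match_rows r1 r2 out) := by unfold Spec_match_rows; infer_instance

-- ===== CLAIM (what is proved, stated in full; the proofs are below) =====
def Claim_equal_match_rows : Prop := ∀ (r1 : String) (r2 : String), Dom_match_rows r1 r2 → Spec_match_rows r1 r2 (match_rows r1 r2)

-- ===== LEMMAS AND PROOFS =====

theorem pvFlip_ne (c : Char) : pvFlip c ≠ c := by
  intro hEq
  unfold pvFlip at hEq
  by_cases h : c = '#'
  · rw [if_pos h] at hEq; rw [h] at hEq; exact absurd hEq (by decide)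
  · rw [if_neg h] at hEq; exact h hEq.symm

theorem getD_set_self (a : List Char) (i : Nat) (c : Char) (h : i < a.length) :
    (a.set i c).getD i ' ' = c := by
  rw [List.getD_eq_getElem _ ' ' (by simpa using h)]
  simp

theorem getD_set_ne (a : List Char) (i j : Nat) (c : Char) (h : j < a.length) (hne : i ≠ j) :
    (a.set i c).getD j ' ' = a.getD j ' ' := by
  rw [List.getD_eq_getElem _ ' ' (by simpa using h), List.getD_eq_getElem a ' ' h]
  simp [hne]

-- A's flip loop succeeds iff the rows differ at exactly one index i and flipping a there yields b
theorem pvTryFlips_iff (a b : List Char) :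
    pvTryFlips a b = true ↔
      ∃ i < a.length, a.length = b.length ∧ pvFlip (a.getD i ' ') = b.getD i ' ' ∧
        ∀ j < a.length, j ≠ i → a.getD j ' ' = b.getD j ' ' := by
  unfold pvTryFlips
  simp only [List.any_eq_true, List.mem_range, decide_eq_true_eq]
  constructor
  · rintro ⟨i, hi, hset⟩
    subst hset
    refine ⟨i, hi, by simp, (getD_set_self a i _ hi).symm, ?_⟩
    intro j hj hne
    exact (getD_set_ne a i j _ hj (fun h => hne h.symm)).symm
  · rintro ⟨i, hi, hlen, hflip, hrest⟩
    refine ⟨i, hi, ?_⟩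
    apply List.ext_getElem (by simpa using hlen)
    intro j hj1 hj2
    have hja : j < a.length := by simpa using hj1
    by_cases hji : j = i
    · subst hji
      rw [List.getElem_set_self]
      rw [List.getD_eq_getElem b ' ' hj2] at hflip
      exact hflip
    · rw [List.getElem_set_ne (by omega)]
      have := hrest j hja hji
      rwa [List.getD_eq_getElem a ' ' hja, List.getD_eq_getElem b ' ' hj2] at this

-- characterisation of B's singleton diff list
theorem diffs_singleton_iff (a b : List Char) (i : Nat) :
    (List.range a.length).filter (fun j => a.getD j ' ' ≠ b.getD j ' ') = [i] ↔
      (i < a.length ∧ a.getD i ' ' ≠ b.getD i ' ' ∧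
       ∀ j < a.length, j ≠ i → a.getD j ' ' = b.getD j ' ') := by
  constructor
  · intro h
    have hmem : ∀ j, j ∈ [i] ↔ j < a.length ∧ a.getD j ' ' ≠ b.getD j ' ' := by
      intro j; rw [← h]; simp [List.mem_filter]
    have hi := (hmem i).mp (by simp)
    refine ⟨hi.1, hi.2, ?_⟩
    intro j hj hne
    by_contra hd
    have := (hmem j).mpr ⟨hj, hd⟩
    simp at this; exact hne this
  · rintro ⟨hi, hd, hrest⟩
    have hnd : ((List.range a.length).filter (fun j => a.getD j ' ' ≠ b.getD j ' ')).Nodup :=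
      (List.nodup_range).filter _
    have hmem : ∀ j, j ∈ (List.range a.length).filter (fun j => a.getD j ' ' ≠ b.getD j ' ') ↔
        (j < a.length ∧ a.getD j ' ' ≠ b.getD j ' ') := by
      intro j; simp [List.mem_filter]
    have himem : i ∈ (List.range a.length).filter (fun j => a.getD j ' ' ≠ b.getD j ' ') :=
      (hmem i).mpr ⟨hi, hd⟩
    have hall : ∀ j ∈ (List.range a.length).filter (fun j => a.getD j ' ' ≠ b.getD j ' '), j = i := by
      intro j hjm
      have := (hmem j).mp hjm
      by_contra hne
      exact this.2 (hrest j this.1 hne)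
    -- a nodup list containing i whose every member equals i is [i]
    rcases hL : (List.range a.length).filter (fun j => a.getD j ' ' ≠ b.getD j ' ') with _ | ⟨x, xs⟩
    · rw [hL] at himem; simp at himem
    · rw [hL] at himem hall hnd
      have hx : x = i := hall x (by simp)
      have hxs : xs = [] := by
        apply List.eq_nil_iff_forall_not_mem.mpr
        intro y hy
        have hyi := hall y (by simp [hy])
        subst hyi; subst hx
        exact (List.nodup_cons.mp hnd).1 hy
      simp [hx, hxs]

-- if the lists have equal length and agree at every index they are equal
theorem lists_eq_of_agree (a b : List Char) (hlen : a.length = b.length)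
    (h : ∀ j < a.length, a.getD j ' ' = b.getD j ' ') : a = b := by
  apply List.ext_getElem hlen
  intro j hj1 hj2
  have := h j hj1
  rwa [List.getD_eq_getElem a ' ' hj1, List.getD_eq_getElem b ' ' hj2] at this

-- ===== VERDICT (by name: the statement is the Claim_ definition above) =====
theorem match_rows_spec : Claim_equal_match_rows := by
  intro r1 r2 _
  unfold Spec_match_rows match_rows match_rows_alt part1
  simp only [Bool.false_eq_true, if_false]
  by_cases heq : r1 = r2
  · rw [if_pos heq, if_pos heq]
  · rw [if_neg heq, if_neg heq]
    set a := r1.toList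
    set b := r2.toList
    have hab : a ≠ b := fun h => heq (String.ext h)
    by_cases hlen : a.length = b.length
    · rw [if_neg (c := a.length ≠ b.length) (fun h => h hlen)]
      rcases hL : pvDiffs a b with _ | ⟨i, xs⟩
      · -- no differing index: contradicts a ≠ b
        exfalso
        apply hab
        apply lists_eq_of_agree a b hlen
        intro j hj
        by_contra hd
        have hm : j ∈ pvDiffs a b :=
          List.mem_filter.mpr ⟨List.mem_range.mpr hj, decide_eq_true hd⟩
        rw [hL] at hm; simp at hm
      · rcases hxs : xs with _ | ⟨i2, xs2⟩
        · -- exactly one diff at i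
          subst hxs
          have hchar := (diffs_singleton_iff a b i).mp hL
          obtain ⟨hi, hd, hrest⟩ := hchar
          have hrest' : ∀ j < b.length, j ≠ i → b.getD j ' ' = a.getD j ' ' := by
            intro j hj hne; exact (hrest j (hlen ▸ hj) hne).symm
          have hA1 : pvTryFlips a b = true ↔ pvFlip (a.getD i ' ') = b.getD i ' ' := by
            rw [pvTryFlips_iff]
            constructor
            · rintro ⟨k, hk, _, hf, hkrest⟩
              have hki : k = i := by
                by_contra hne
                rw [hrest k hk hne] at hf
                exact pvFlip_ne _ hf
              subst hki; exact hf
            · intro hf; exact ⟨i, hi, hlen, hf, hrest⟩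
          have hA2 : pvTryFlips b a = true ↔ pvFlip (b.getD i ' ') = a.getD i ' ' := by
            rw [pvTryFlips_iff]
            constructor
            · rintro ⟨k, hk, _, hf, hkrest⟩
              have hki : k = i := by
                by_contra hne
                rw [hrest' k hk hne] at hf
                exact pvFlip_ne _ hf
              subst hki; exact hf
            · intro hf; exact ⟨i, hlen ▸ hi, hlen.symm, hf, hrest'⟩
          have hBred : (match [i] with
              | [k] =>
                if pvFlip (a.getD k ' ') = b.getD k ' ' ∨
                   pvFlip (b.getD k ' ') = a.getD k ' ' then ((true : Bool), (true : Bool))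
                else (false, false)
              | _ => ((false : Bool), (false : Bool))) =
              (if pvFlip (a.getD i ' ') = b.getD i ' ' ∨
                  pvFlip (b.getD i ' ') = a.getD i ' ' then ((true : Bool), (true : Bool))
               else (false, false)) := rfl
          rw [hBred]
          by_cases h1 : pvFlip (a.getD i ' ') = b.getD i ' '
          · rw [hA1.mpr h1, if_pos rfl, if_pos (Or.inl h1)]
          · have g1 : pvTryFlips a b = false :=
              Bool.eq_false_iff.mpr (fun hx => h1 (hA1.mp hx))
            rw [g1]
            simp only [Bool.false_eq_true, if_false]
            by_cases h2 : pvFlip (b.getD i ' ') = a.getD i ' '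
            · rw [hA2.mpr h2, if_pos rfl, if_pos (Or.inr h2)]
            · have g2 : pvTryFlips b a = false :=
                Bool.eq_false_iff.mpr (fun hx => h2 (hA2.mp hx))
              rw [g2]
              simp only [Bool.false_eq_true, if_false]
              rw [if_neg (fun h => h.elim h1 h2)]
        · -- at least two differing indices: both flip loops fail, B's match falls through
          subst hxs
          have hmem : ∀ j, j ∈ (i :: i2 :: xs2) ↔ j ∈ pvDiffs a b := by
            intro j; rw [hL]
          have hmemc : ∀ j, j ∈ pvDiffs a b ↔ (j < a.length ∧ a.getD j ' ' ≠ b.getD j ' ') := by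
            intro j
            unfold pvDiffs
            simp [List.mem_filter]
          have hnd : (i :: i2 :: xs2).Nodup := hL ▸ (List.nodup_range).filter _
          have hne12 : i ≠ i2 := by
            intro h; subst h; exact (List.nodup_cons.mp hnd).1 (by simp)
          have hi := (hmemc i).mp ((hmem i).mp (by simp))
          have hi2 := (hmemc i2).mp ((hmem i2).mp (by simp))
          have g1 : pvTryFlips a b = false := by
            rw [Bool.eq_false_iff]
            intro hT
            obtain ⟨k, hk, _, hf, hkrest⟩ := (pvTryFlips_iff a b).mp hT
            by_cases hki : k = i
            · exact hi2.2 (hkrest i2 hi2.1 (by omega))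
            · exact hi.2 (hkrest i hi.1 (fun h => hki h.symm))
          have g2 : pvTryFlips b a = false := by
            rw [Bool.eq_false_iff]
            intro hT
            obtain ⟨k, hk, _, hf, hkrest⟩ := (pvTryFlips_iff b a).mp hT
            by_cases hki : k = i
            · exact hi2.2 ((hkrest i2 (hlen ▸ hi2.1) (by omega)).symm)
            · exact hi.2 ((hkrest i (hlen ▸ hi.1) (fun h => hki h.symm)).symm)
          rw [g1, g2]
          simp only [Bool.false_eq_true, if_false]
    · -- unequal lengths: flips preserve length, so both loops fail; B bails out at once
      have g1 : pvTryFlips a b = false := by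
        rw [Bool.eq_false_iff]
        intro hT
        obtain ⟨_, _, hl, _, _⟩ := (pvTryFlips_iff a b).mp hT
        exact hlen hl
      have g2 : pvTryFlips b a = false := by
        rw [Bool.eq_false_iff]
        intro hT
        obtain ⟨_, _, hl, _, _⟩ := (pvTryFlips_iff b a).mp hT
        exact hlen hl.symm
      rw [g1, g2, if_pos hlen]
      simp only [Bool.false_eq_true, if_false]
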